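-- pv_equiv track=rewrite | github.com/Rampo8/tgbot | handlers/video.py | is_video_link
-- ===== SOURCE A (Python) =====
-- def is_video_link(text):
--     """
--     Проверяет, является ли текст ссылкой на видео.
--     """
--     video_domains = [
--         'youtube.com', 'youtu.be',
--         'rutube.ru', 'rutube.com',
--         'instagram.com', 'instagr.am',
--         'vimeo.com', 'tiktok.com',
--         'twitter.com', 'x.com',
--         'facebook.com', 'fb.watch'
--     ]
--
--     text_lower = text.lower()
--     return any(domain in text_lower for domain in video_domains)
-- ===== SOURCE B (Python) =====
-- def is_video_link(text):
--     """
--     Проверяет, является ли текст ссылкой на видео.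
--     """
--     video_domains = [
--         'youtube.com', 'youtu.be',
--         'rutube.ru', 'rutube.com',
--         'instagram.com', 'instagr.am',
--         'vimeo.com', 'tiktok.com',
--         'twitter.com', 'x.com',
--         'facebook.com', 'fb.watch'
--     ]
--     t = text.lower()
--     for i in range(len(t)):
--         for domain in video_domains:
--             if t.startswith(domain, i):
--                 return True
--     return False
-- ===== Notes on version B (the rewrite author's own statement) =====
-- stated objective: alternative
-- what changed: Replaces 12 independent whole-text substring searches with a single left-to-right scan that at each position tests whether any domain starts there, returning at the first match.
import Mathlib
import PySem

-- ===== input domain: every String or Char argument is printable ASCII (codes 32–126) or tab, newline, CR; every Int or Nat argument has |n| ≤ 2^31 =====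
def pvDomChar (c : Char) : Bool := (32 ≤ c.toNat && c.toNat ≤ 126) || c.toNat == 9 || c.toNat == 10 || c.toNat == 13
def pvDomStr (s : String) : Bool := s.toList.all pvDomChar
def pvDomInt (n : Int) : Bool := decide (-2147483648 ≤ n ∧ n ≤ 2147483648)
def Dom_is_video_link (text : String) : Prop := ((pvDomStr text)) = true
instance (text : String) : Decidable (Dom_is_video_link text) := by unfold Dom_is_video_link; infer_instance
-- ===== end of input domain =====

-- B scans the lowered text once left-to-right, testing at each position whether any
-- domain starts there, instead of A's 12 independent whole-text substring tests.
-- ===== PORT A =====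
def videoDomainsA : List String :=
  ["youtube.com", "youtu.be",
   "rutube.ru", "rutube.com",
   "instagram.com", "instagr.am",
   "vimeo.com", "tiktok.com",
   "twitter.com", "x.com",
   "facebook.com", "fb.watch"]

def is_video_link (text : String) : Bool :=
  let text_lower := PySem.Str.lower text
  videoDomainsA.any (fun domain => PySem.Str.isIn domain text_lower)

-- ===== PORT B =====
def videoDomainsB : List (List Char) :=
  ["youtube.com", "youtu.be",
   "rutube.ru", "rutube.com",
   "instagram.com", "instagr.am",
   "vimeo.com", "tiktok.com",
   "twitter.com", "x.com",
   "facebook.com", "fb.watch"].map String.toList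

-- the position loop of B: walk the suffixes of t; at each one test whether any domain is a prefix
def scanDomains (t : List Char) : Bool :=
  match t with
  | [] => false
  | _ :: rest =>
      if videoDomainsB.any (fun d => PySem.Chars.startswith t d) then true
      else scanDomains rest

def is_video_link_alt (text : String) : Bool :=
  scanDomains (PySem.Str.lower text).toList

-- ===== PRECONDITION & SPEC =====
def Spec_is_video_link (text : String) (out : Bool) : Prop := out = is_video_link_alt text
instance (text : String) (out : Bool) : Decidable (Spec_is_video_link text out) := by unfold Spec_is_video_link; infer_instance

-- ===== CLAIM (what is proved, stated in full; the proofs are below) =====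
def Claim_equal_is_video_link : Prop := ∀ (text : String), Dom_is_video_link text → Spec_is_video_link text (is_video_link text)

-- ===== LEMMAS AND PROOFS =====

-- ===== VERDICT (by name: the statement is the Claim_ definition above) =====
-- scanDomains finds exactly the domains occurring as an infix (all domains are nonempty)
lemma scanDomains_iff (t : List Char) :
    scanDomains t = true ↔ ∃ d ∈ videoDomainsB, d <:+: t := by
  induction t with
  | nil =>
      simp only [scanDomains, List.infix_nil]
      constructor
      · intro h; cases h
      · rintro ⟨d, hd, rfl⟩; revert hd; decide
  | cons c rest ih =>
      rw [scanDomains]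
      split_ifs with h
      · simp only [List.any_eq_true, PySem.Chars.startswith_iff] at h
        obtain ⟨d, hd, hpre⟩ := h
        exact iff_of_true rfl ⟨d, hd, hpre.isInfix⟩
      · rw [ih]
        simp only [List.any_eq_true, PySem.Chars.startswith_iff, not_exists, not_and] at h
        constructor
        · rintro ⟨d, hd, hi⟩; exact ⟨d, hd, hi.trans (List.suffix_cons c rest).isInfix⟩
        · rintro ⟨d, hd, hi⟩
          rcases List.infix_cons_iff.1 hi with hp | hi'
          · exact absurd hp (h d hd)
          · exact ⟨d, hd, hi'⟩

-- ===== VERDICT =====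
theorem is_video_link_spec : Claim_equal_is_video_link := by
  intro text _
  unfold Spec_is_video_link is_video_link is_video_link_alt
  rw [Bool.eq_iff_iff, scanDomains_iff]
  simp only [List.any_eq_true, PySem.Str.isIn_eq, PySem.Chars.isIn_iff_infix,
    videoDomainsA, videoDomainsB, List.mem_map]
  constructor
  · rintro ⟨d, hd, hi⟩; exact ⟨d.toList, ⟨d, hd, rfl⟩, hi⟩
  · rintro ⟨_, ⟨d, hd, rfl⟩, hi⟩; exact ⟨d, hd, hi⟩
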